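-- pv_equiv track=rewrite | github.com/YunCe-Code/Vulnerable-Region-Discovery | attack.py | remove_same
-- ===== SOURCE A (Python) =====
-- def remove_same(tuples, values):
--     # Remove the individual with same coordinate and preserve the one cause the most damage.
--     largest_tuples = {}
--     for t, v in zip(tuples, values):
--         key = (t[0], t[1])  # First two elements as the key
--         if key not in largest_tuples or v > largest_tuples[key][1]:
--             largest_tuples[key] = (t, v)
-- # Extract the tuples with the largest values
--     result = [t for t, v in largest_tuples.values()]
--     return result
-- ===== SOURCE B (Python) =====
-- def remove_same(tuples, values):
--     # Partition into buckets per coordinate key, then reduce each bucket with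
--     # first-max (matches the strict-'>' streaming update of the original).
--     groups = {}
--     for t, v in zip(tuples, values):
--         groups.setdefault((t[0], t[1]), []).append((t, v))
--     return [max(bucket, key=lambda p: p[1])[0] for bucket in groups.values()]
-- ===== Notes on version B (the rewrite author's own statement) =====
-- stated objective: alternative
-- what changed: Replaces the streaming running-max dict (compare-and-overwrite per element) by a two-phase partition-then-reduce: one unconditional grouping pass into buckets, then a reduction of each bucket with first-max by value.
import Mathlib
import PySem

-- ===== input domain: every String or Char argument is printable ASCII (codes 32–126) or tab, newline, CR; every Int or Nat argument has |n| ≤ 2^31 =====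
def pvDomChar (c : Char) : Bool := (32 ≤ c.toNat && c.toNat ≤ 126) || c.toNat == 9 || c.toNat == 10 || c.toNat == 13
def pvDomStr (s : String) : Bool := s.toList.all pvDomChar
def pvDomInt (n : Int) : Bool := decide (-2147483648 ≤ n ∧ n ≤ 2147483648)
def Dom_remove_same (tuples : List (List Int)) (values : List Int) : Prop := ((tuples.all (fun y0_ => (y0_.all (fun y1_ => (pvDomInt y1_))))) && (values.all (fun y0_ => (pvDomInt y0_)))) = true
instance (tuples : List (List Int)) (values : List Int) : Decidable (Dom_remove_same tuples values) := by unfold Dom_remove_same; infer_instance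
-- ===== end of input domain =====

-- B replaces A's streaming compare-and-overwrite dict by a partition-into-buckets pass
-- followed by a first-max reduction of each bucket (alternative decomposition, same cost).


-- ===== PORT A =====
-- t[0] / t[1] are ported with pyGetD (exact under Pre_, which demands length ≥ 2 for every zipped tuple).
def remove_same (tuples : List (List Int)) (values : List Int) : List (List Int) :=
  let largest_tuples : PySem.Dict (Int × Int) (List Int × Int) :=
    (tuples.zip values).foldl
      (fun d p =>
        let key := (PySem.List.pyGetD p.1 0 0, PySem.List.pyGetD p.1 1 0)
        if !(d.contains key) || decide ((d.getD key ([], 0)).2 < p.2) then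
          d.insert key p
        else d)
      PySem.Dict.empty
  largest_tuples.values.map (fun q => q.1)

-- ===== PORT B =====
-- groups.setdefault(key, []).append((t, v)) is PySem.Dict.modify key [] (· ++ [(t, v)]);
-- max(bucket, key=λp. p[1]) is PySem.List.maxD (first maximum; the default is never used: buckets are nonempty).
def remove_same_alt (tuples : List (List Int)) (values : List Int) : List (List Int) :=
  let groups : PySem.Dict (Int × Int) (List (List Int × Int)) :=
    (tuples.zip values).foldl
      (fun g p =>
        g.modify (PySem.List.pyGetD p.1 0 0, PySem.List.pyGetD p.1 1 0) [] (fun b => b ++ [p]))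
      PySem.Dict.empty
  groups.values.map (fun bucket => (PySem.List.maxD bucket (fun q => q.2) ([], 0)).1)

-- ===== PRECONDITION & SPEC =====
-- Pre_: Python A raises IndexError on t[0]/t[1] when a zipped tuple has fewer than 2 elements; exactly those inputs are excluded.
def Pre_remove_same (tuples : List (List Int)) (values : List Int) : Prop :=
  ∀ p ∈ tuples.zip values, 2 ≤ p.1.length
instance (tuples : List (List Int)) (values : List Int) : Decidable (Pre_remove_same tuples values) := by unfold Pre_remove_same; infer_instance
def pvWitness_remove_same : List (List Int) × List Int := ([[1, 2, 3], [1, 2, 4], [0, 5]], [5, 7, 1])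

def Spec_remove_same (tuples : List (List Int)) (values : List Int) (out : List (List Int)) : Prop := out = remove_same_alt tuples values
instance (tuples : List (List Int)) (values : List Int) (out : List (List Int)) : Decidable (Spec_remove_same tuples values out) := by unfold Spec_remove_same; infer_instance

-- ===== CLAIM (what is proved, stated in full; the proofs are below) =====
def Claim_equal_remove_same : Prop := ∀ (tuples : List (List Int)) (values : List Int), Dom_remove_same tuples values → Pre_remove_same tuples values → Spec_remove_same tuples values (remove_same tuples values)

-- ===== LEMMAS AND PROOFS =====

-- The coordinate key of one zipped pair.
def pvKey (p : List Int × Int) : Int × Int := (PySem.List.pyGetD p.1 0 0, PySem.List.pyGetD p.1 1 0)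

-- The bucket of pairs that share key c.
def pvGroup (c : Int × Int) (L : List (List Int × Int)) : List (List Int × Int) :=
  L.filter (fun p => pvKey p == c)

-- A's loop body.
def pvStepA (d : PySem.Dict (Int × Int) (List Int × Int)) (p : List Int × Int) :
    PySem.Dict (Int × Int) (List Int × Int) :=
  if !(d.contains (pvKey p)) || decide ((d.getD (pvKey p) ([], 0)).2 < p.2) then
    d.insert (pvKey p) p
  else d

lemma pvMax?_append_singleton (g : List (List Int × Int)) (x : List Int × Int) :
    PySem.List.max? (g ++ [x]) (fun q => q.2) =
      match PySem.List.max? g (fun q => q.2) with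
      | none => some x
      | some m => if m.2 < x.2 then some x else some m := by
  unfold PySem.List.max?
  rw [List.foldl_append]
  generalize List.foldl _ none g = acc
  cases acc <;> rfl

lemma pvA_get? (L : List (List Int × Int)) (c : Int × Int) :
    (L.foldl pvStepA PySem.Dict.empty).get? c =
      PySem.List.max? (pvGroup c L) (fun q => q.2) := by
  induction L using List.reverseRecOn with
  | nil => simp [pvGroup, PySem.List.max?]
  | append_singleton L p ih =>
    rw [List.foldl_append, List.foldl_cons, List.foldl_nil]
    set d0 := L.foldl pvStepA PySem.Dict.empty with hd0
    by_cases hk : pvKey p = c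
    · have hgrp : pvGroup c (L ++ [p]) = pvGroup c L ++ [p] := by
        simp [pvGroup, List.filter_append, hk]
      rw [hgrp, pvMax?_append_singleton]
      unfold pvStepA
      cases hg : PySem.List.max? (pvGroup c L) (fun q => q.2) with
      | none =>
        rw [hg] at ih
        have hcont : d0.contains (pvKey p) = false := by
          rw [PySem.Dict.contains_eq_isSome_get?, hk, ih]; rfl
        simp only [hcont, Bool.not_false, Bool.true_or, if_pos]
        rw [hk, PySem.Dict.get?_insert_self]
      | some m =>
        rw [hg] at ih
        have hget : d0.get? (pvKey p) = some m := by rw [hk, ih]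
        have hcont : d0.contains (pvKey p) = true := by
          rw [PySem.Dict.contains_eq_isSome_get?, hget]; rfl
        have hgetD : d0.getD (pvKey p) ([], 0) = m :=
          PySem.Dict.getD_of_get?_eq_some _ _ hget
        simp only [hcont, hgetD, Bool.not_true, Bool.false_or]
        by_cases hlt : m.2 < p.2
        · rw [if_pos (by simpa using hlt), if_pos hlt, hk, PySem.Dict.get?_insert_self]
        · rw [if_neg (by simpa using hlt), if_neg hlt, ih]
    · have hgrp : pvGroup c (L ++ [p]) = pvGroup c L := by
        simp [pvGroup, List.filter_append, hk]
      rw [hgrp, ← ih]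
      unfold pvStepA
      split
      · exact PySem.Dict.get?_insert_of_ne _ _ (fun h => hk h.symm)
      · rfl

lemma pvA_keys (L : List (List Int × Int)) :
    (L.foldl pvStepA PySem.Dict.empty).keys = PySem.Set.ofList (L.map pvKey) := by
  induction L using List.reverseRecOn with
  | nil => rfl
  | append_singleton L p ih =>
    rw [List.foldl_append, List.foldl_cons, List.foldl_nil, List.map_append,
      List.map_cons, List.map_nil, PySem.Set.ofList_append_singleton]
    set d0 := L.foldl pvStepA PySem.Dict.empty with hd0
    unfold pvStepA
    by_cases hc : d0.contains (pvKey p) = true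
    · have hmem : pvKey p ∈ PySem.Set.ofList (L.map pvKey) := by
        rw [← ih, ← PySem.Dict.contains_iff_mem_keys]; exact hc
      rw [PySem.Set.add_of_mem hmem, ← ih]
      split
      · rw [PySem.Dict.keys_insert_of_contains _ _ hc]
      · rfl
    · have hc' : d0.contains (pvKey p) = false := by simpa using hc
      have hmem : pvKey p ∉ PySem.Set.ofList (L.map pvKey) := by
        rw [← ih, ← PySem.Dict.contains_iff_mem_keys]; simp [hc']
      rw [PySem.Set.add_of_not_mem hmem, ← ih]
      simp only [hc', Bool.not_false, Bool.true_or, if_pos]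
      rw [PySem.Dict.keys_insert_of_not_contains _ _ hc']

lemma pvB_keys (L : List (List Int × Int)) :
    (L.foldl (fun g p => g.modify (pvKey p) [] (fun b => b ++ [p]))
        (PySem.Dict.empty : PySem.Dict (Int × Int) (List (List Int × Int)))).keys =
      PySem.Set.ofList (L.map pvKey) := by
  rw [PySem.Dict.keys_foldl_modify_key L pvKey [] (fun _ p b => b ++ [p]) PySem.Dict.empty]
  rfl

lemma pvB_getD (L : List (List Int × Int)) (c : Int × Int) :
    (L.foldl (fun g p => g.modify (pvKey p) [] (fun b => b ++ [p]))
        (PySem.Dict.empty : PySem.Dict (Int × Int) (List (List Int × Int)))).getD c [] =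
      pvGroup c L := by
  have h := PySem.Dict.getD_foldl_modify_append (L.map (fun p => (pvKey p, p)))
    (PySem.Dict.empty : PySem.Dict (Int × Int) (List (List Int × Int))) c
  rw [List.foldl_map] at h
  simpa [pvGroup, List.filter_map, Function.comp_def] using h

lemma pvMain (tuples : List (List Int)) (values : List Int) :
    remove_same tuples values = remove_same_alt tuples values := by
  show ((tuples.zip values).foldl pvStepA PySem.Dict.empty).values.map (fun q => q.1)
      = ((tuples.zip values).foldl (fun g p => g.modify (pvKey p) [] (fun b => b ++ [p]))
            PySem.Dict.empty).values.map
          (fun bucket => (PySem.List.maxD bucket (fun q => q.2) ([], 0)).1)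
  set L := tuples.zip values with hL
  have hnodA : (L.foldl pvStepA PySem.Dict.empty).keys.Nodup := by
    rw [pvA_keys]; exact PySem.Set.nodup_ofList _
  have hnodB : (L.foldl (fun g p => g.modify (pvKey p) [] (fun b => b ++ [p]))
      (PySem.Dict.empty : PySem.Dict (Int × Int) (List (List Int × Int)))).keys.Nodup := by
    rw [pvB_keys]; exact PySem.Set.nodup_ofList _
  rw [PySem.Dict.values_eq_map_keys _ hnodA ([], 0), PySem.Dict.values_eq_map_keys _ hnodB [],
      pvA_keys, pvB_keys, List.map_map, List.map_map]
  refine List.map_congr_left (fun k _ => ?_)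
  simp only [Function.comp_apply]
  rw [PySem.Dict.getD_eq_get?_getD, pvA_get?, pvB_getD]
  rfl

-- ===== VERDICT (by name: the statement is the Claim_ definition above) =====
theorem remove_same_spec : Claim_equal_remove_same := by
  intro tuples values _ _
  unfold Spec_remove_same
  exact pvMain tuples values
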